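-- pv_equiv track=rewrite | github.com/sw965/seviper | ai.py | make_feature_1d_index_to_2d
-- ===== SOURCE A (Python) =====
-- import itertools
--
-- def make_feature_1d_index_to_2d(indices_1d_to_2d, features, is_inclusion_mode):
--     features_length = len(features)
--     count = (i for i in range(len(indices_1d_to_2d)))
--
--     result = [[indices_1d_to_2d[next(count)] for j in range(len(indices_1d_to_2d) // features_length)] \
--                for i in range(features_length)]
--
--     if is_inclusion_mode:
--         return list(itertools.accumulate(result))
--     else:
--         return result
-- ===== SOURCE B (Python) =====
-- def make_feature_1d_index_to_2d(indices_1d_to_2d, features, is_inclusion_mode):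
--     if not features:
--         return []
--     cols = len(indices_1d_to_2d) // len(features)
--     if is_inclusion_mode:
--         return [indices_1d_to_2d[:(i + 1) * cols] for i in range(len(features))]
--     return [indices_1d_to_2d[i * cols:(i + 1) * cols] for i in range(len(features))]
-- ===== Notes on version B (the rewrite author's own statement) =====
-- stated objective: simpler
-- what changed: Replaces the shared-generator nested comprehension and itertools.accumulate with direct list slicing: row i is the slice [i*cols:(i+1)*cols], and in inclusion mode the cumulative row is the closed-form prefix slice [:(i+1)*cols] instead of accumulating concatenations.
import Mathlib
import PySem

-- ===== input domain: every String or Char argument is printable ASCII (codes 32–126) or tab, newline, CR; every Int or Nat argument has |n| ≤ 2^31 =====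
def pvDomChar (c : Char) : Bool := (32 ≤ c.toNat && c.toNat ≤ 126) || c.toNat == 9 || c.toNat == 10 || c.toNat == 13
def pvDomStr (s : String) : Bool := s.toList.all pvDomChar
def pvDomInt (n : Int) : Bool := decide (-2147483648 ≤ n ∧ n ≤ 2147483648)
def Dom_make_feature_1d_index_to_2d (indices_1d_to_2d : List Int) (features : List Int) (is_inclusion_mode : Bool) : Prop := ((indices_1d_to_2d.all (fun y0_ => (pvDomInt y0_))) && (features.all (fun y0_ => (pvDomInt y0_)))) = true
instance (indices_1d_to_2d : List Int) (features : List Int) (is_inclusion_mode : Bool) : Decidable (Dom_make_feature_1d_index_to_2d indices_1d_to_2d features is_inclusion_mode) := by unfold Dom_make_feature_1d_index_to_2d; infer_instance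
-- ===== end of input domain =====

-- B replaces A's shared-generator nested comprehension + itertools.accumulate by direct slicing
-- (row i = xs[i*cols:(i+1)*cols]; in inclusion mode the closed-form prefix slice xs[:(i+1)*cols]);
-- objective: simpler. Both programs are total on the domain.

-- ===== PORT A =====
-- The shared generator `count` is ported as an explicit Nat counter threaded through the folds.
-- The index handed to pyGet? is the counter, always < len(indices) (proved below), so the
-- `.getD 0` default is never used; likewise Python's `//` here is on nonnegative lengths, so
-- Nat division matches, and when features is empty the inner range is never evaluated.
def make_feature_1d_index_to_2d (indices_1d_to_2d : List Int) (features : List Int) (is_inclusion_mode : Bool) : List (List Int) :=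
  let features_length := features.length
  let result := ((List.range features_length).foldl
    (fun (p : List (List Int) × Nat) _ =>
      let q := (List.range (indices_1d_to_2d.length / features_length)).foldl
        (fun (r : List Int × Nat) _ =>
          (r.1 ++ [(PySem.List.pyGet? indices_1d_to_2d (r.2 : Int)).getD 0], r.2 + 1))
        ([], p.2)
      (p.1 ++ [q.1], q.2))
    ([], 0)).1
  if is_inclusion_mode then
    -- list(itertools.accumulate(result)) with list concatenation
    (result.foldl (fun (acc : List (List Int) × List Int) row =>
      (acc.1 ++ [acc.2 ++ row], acc.2 ++ row)) ([], [])).1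
  else
    result

-- ===== PORT B =====
def make_feature_1d_index_to_2d_alt (indices_1d_to_2d : List Int) (features : List Int) (is_inclusion_mode : Bool) : List (List Int) :=
  if features.length = 0 then []
  else
    let cols := indices_1d_to_2d.length / features.length
    if is_inclusion_mode then
      (List.range features.length).map (fun i =>
        PySem.List.slice indices_1d_to_2d none (some (((i + 1) * cols : Nat) : Int)))
    else
      (List.range features.length).map (fun i =>
        PySem.List.slice indices_1d_to_2d (some ((i * cols : Nat) : Int)) (some (((i + 1) * cols : Nat) : Int)))

-- ===== PRECONDITION & SPEC =====
def Spec_make_feature_1d_index_to_2d (indices_1d_to_2d : List Int) (features : List Int) (is_inclusion_mode : Bool) (out : List (List Int)) : Prop := out = make_feature_1d_index_to_2d_alt indices_1d_to_2d features is_inclusion_mode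
instance (indices_1d_to_2d : List Int) (features : List Int) (is_inclusion_mode : Bool) (out : List (List Int)) : Decidable (Spec_make_feature_1d_index_to_2d indices_1d_to_2d features is_inclusion_mode out) := by unfold Spec_make_feature_1d_index_to_2d; infer_instance

-- ===== CLAIM (what is proved, stated in full; the proofs are below) =====
def Claim_equal_make_feature_1d_index_to_2d : Prop := ∀ (indices_1d_to_2d : List Int) (features : List Int) (is_inclusion_mode : Bool), Dom_make_feature_1d_index_to_2d indices_1d_to_2d features is_inclusion_mode → Spec_make_feature_1d_index_to_2d indices_1d_to_2d features is_inclusion_mode (make_feature_1d_index_to_2d indices_1d_to_2d features is_inclusion_mode)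

-- ===== LEMMAS AND PROOFS =====

-- the inner comprehension: consumes cols counter values starting at c
theorem inner_fold (xs : List Int) (cols : Nat) : ∀ (c : Nat) (r : List Int),
    (List.range cols).foldl
      (fun (r : List Int × Nat) _ =>
        (r.1 ++ [(PySem.List.pyGet? xs (r.2 : Int)).getD 0], r.2 + 1)) (r, c)
    = (r ++ (List.range cols).map (fun j => (PySem.List.pyGet? xs ((c + j : Nat) : Int)).getD 0),
       c + cols) := by
  induction cols with
  | zero => simp
  | succ n ih =>
    intro c r
    rw [List.range_succ, List.foldl_append, ih, List.map_append]
    simp only [List.foldl_cons, List.foldl_nil, List.map_cons, List.map_nil]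
    refine Prod.ext ?_ (by omega)
    simp only [List.append_assoc]

-- the outer comprehension: result = one chunk per feature
theorem outer_fold (xs : List Int) (cols : Nat) : ∀ (m : Nat),
    ((List.range m).foldl
      (fun (p : List (List Int) × Nat) _ =>
        let q := (List.range cols).foldl
          (fun (r : List Int × Nat) _ =>
            (r.1 ++ [(PySem.List.pyGet? xs (r.2 : Nat) : Option Int).getD 0], r.2 + 1))
          ([], p.2)
        (p.1 ++ [q.1], q.2)) ([], 0))
    = ((List.range m).map (fun i =>
        (List.range cols).map (fun j => (PySem.List.pyGet? xs ((i * cols + j : Nat) : Int)).getD 0)),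
       m * cols) := by
  intro m
  induction m with
  | zero => simp
  | succ n ih =>
    rw [List.range_succ, List.foldl_append, ih, List.map_append]
    simp only [List.foldl_cons, List.foldl_nil, inner_fold]
    refine Prod.ext ?_ (by rw [Nat.succ_mul])
    simp

-- a chunk of in-range getD's is the corresponding drop/take
theorem chunk_eq (xs : List Int) (cols c : Nat) (h : c + cols ≤ xs.length) :
    (List.range cols).map (fun j => (PySem.List.pyGet? xs ((c + j : Nat) : Int)).getD 0)
    = (xs.drop c).take cols := by
  apply List.ext_getElem
  · simp; omega
  · intro i h1 h2
    have hi : i < cols := by simpa using h1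
    have hcl : c + i < xs.length := by omega
    simp only [List.getElem_map, List.getElem_range, List.getElem_take, List.getElem_drop]
    rw [PySem.List.pyGet?_natCast, List.getElem?_eq_getElem hcl]
    rfl

-- joining the first m chunks gives the length-(m*cols) prefix
theorem flatten_chunks (xs : List Int) (cols : Nat) : ∀ (m : Nat),
    ((List.range m).map (fun k => (xs.drop (k * cols)).take cols)).flatten = xs.take (m * cols) := by
  intro m
  induction m with
  | zero => simp
  | succ n ih =>
    rw [List.range_succ, List.map_append, List.flatten_append, ih]
    rw [Nat.succ_mul, List.take_add]
    simp

-- the accumulate fold produces all running concatenations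
theorem accum_fold (rows : List (List Int)) : ∀ (A0 : List (List Int)) (P0 : List Int),
    (rows.foldl (fun (acc : List (List Int) × List Int) row =>
      (acc.1 ++ [acc.2 ++ row], acc.2 ++ row)) (A0, P0)).1
    = A0 ++ (List.range rows.length).map (fun i => P0 ++ (rows.take (i + 1)).flatten) := by
  induction rows with
  | nil => simp
  | cons r rs ih =>
    intro A0 P0
    rw [List.foldl_cons, ih]
    simp only [List.length_cons, List.range_succ_eq_map, List.map_cons, List.map_map]
    simp [List.append_assoc]

theorem make_feature_1d_index_to_2d_eq (xs fs : List Int) (m : Bool) :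
    make_feature_1d_index_to_2d xs fs m = make_feature_1d_index_to_2d_alt xs fs m := by
  unfold make_feature_1d_index_to_2d make_feature_1d_index_to_2d_alt
  by_cases hf : fs.length = 0
  · simp [hf]
  · simp only [hf, if_false]
    set fl := fs.length with hfl
    set cols := xs.length / fl with hcols
    have hres := outer_fold xs cols fl
    have hbound : fl * cols ≤ xs.length := by
      rw [hcols, Nat.mul_comm]; exact Nat.div_mul_le_self _ _
    have hchunk : ∀ i, i < fl →
        (List.range cols).map (fun j => (PySem.List.pyGet? xs ((i * cols + j : Nat) : Int)).getD 0)
        = (xs.drop (i * cols)).take cols := by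
      intro i hi
      apply chunk_eq
      have : (i + 1) * cols ≤ fl * cols := Nat.mul_le_mul_right _ hi
      calc i * cols + cols = (i + 1) * cols := by ring
        _ ≤ fl * cols := this
        _ ≤ xs.length := hbound
    have hmap : (List.range fl).map (fun i =>
        (List.range cols).map (fun j => (PySem.List.pyGet? xs ((i * cols + j : Nat) : Int)).getD 0))
        = (List.range fl).map (fun i => (xs.drop (i * cols)).take cols) := by
      apply List.map_congr_left
      intro i hi
      exact hchunk i (List.mem_range.mp hi)
    rw [hres, hmap]
    cases m with
    | false =>
      simp only [Bool.false_eq_true, if_false]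
      apply List.map_congr_left
      intro i hi
      rw [PySem.List.slice_natCast,
        show (i + 1) * cols - i * cols = cols by rw [Nat.succ_mul, Nat.add_sub_cancel_left]]
    | true =>
      simp only [if_true]
      rw [accum_fold]
      simp only [List.nil_append, List.length_map, List.length_range]
      apply List.map_congr_left
      intro i hi
      have hi' : i < fl := List.mem_range.mp hi
      rw [← List.map_take, List.take_range, Nat.min_eq_left (by omega), flatten_chunks,
        PySem.List.slice_to_natCast]

-- ===== VERDICT (by name: the statement is the Claim_ definition above) =====
theorem make_feature_1d_index_to_2d_spec : Claim_equal_make_feature_1d_index_to_2d := by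
  intro xs fs m _
  unfold Spec_make_feature_1d_index_to_2d
  exact make_feature_1d_index_to_2d_eq xs fs m
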